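-- pv_equiv track=rewrite | github.com/GundalaNikhil/DSA | brute_force_que005.py | find_formula
-- ===== SOURCE A (Python) =====
-- def find_formula(n, k, arr, expected):
--     """Find formula using brute force"""
--     # Try all combinations of operations on arr and k, n
--     for i in range(len(arr)):
--         for j in range(len(arr)):
--             val = arr[i] + arr[j]
--             if val == expected or val % 100 == expected:
--                 return f"arr[{i}] + arr[{j}]"
--
--             val = arr[i] - arr[j]
--             if val == expected or val % 100 == expected:
--                 return f"arr[{i}] - arr[{j}]"
--
--             val = (arr[i] + arr[j]) % 100
--             if val == expected:
--                 return f"(arr[{i}] + arr[{j}]) % 100"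
--
--             val = arr[i] * k
--             if val == expected or val % 100 == expected:
--                 return f"arr[{i}] * {k}"
--
--     # Try with indices
--     for i in range(len(arr)):
--         val = (arr[i] + k) % 100
--         if val == expected:
--             return f"(arr[{i}] + {k}) % 100"
--
--         val = (arr[i] - k) % 100
--         if val == expected:
--             return f"(arr[{i}] - {k}) % 100"
--
--         val = (arr[i] * k) % 100
--         if val == expected:
--             return f"(arr[{i}] * {k}) % 100"
--
--         val = (i + arr[i]) % 100
--         if val == expected:
--             return f"({i} + arr[{i}]) % 100"
--
--     return None
-- ===== SOURCE B (Python) =====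
-- def find_formula(n, k, arr, expected):
--     """Find formula using brute force"""
--     # O(n): hash value->first index and residue->first index; per i the minimal
--     # matching j for each condition is an O(1) lookup, condition priority kept.
--     first_val = {}
--     for idx, v in enumerate(arr):
--         if v not in first_val:
--             first_val[v] = idx
--     first_res = {}
--     for idx, v in enumerate(arr):
--         r = v % 100
--         if r not in first_res:
--             first_res[r] = idx
--     big = len(arr)
--     in_range = 0 <= expected < 100
--     for i, a in enumerate(arr):
--         t1 = expected - a
--         j1 = first_val.get(t1, big)
--         if in_range:
--             j1 = min(j1, first_res.get(t1 % 100, big))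
--         t2 = a - expected
--         j2 = first_val.get(t2, big)
--         if in_range:
--             j2 = min(j2, first_res.get(t2 % 100, big))
--         m = a * k
--         c4 = (m == expected) or (in_range and m % 100 == expected)
--         j4 = 0 if c4 else big
--         jm = min(min(j1, j2), j4)
--         if jm < big:
--             if j1 == jm:
--                 return f"arr[{i}] + arr[{jm}]"
--             if j2 == jm:
--                 return f"arr[{i}] - arr[{jm}]"
--             return f"arr[{i}] * {k}"
--     if in_range:
--         for i, a in enumerate(arr):
--             if (a + k) % 100 == expected:
--                 return f"(arr[{i}] + {k}) % 100"
--             if (a - k) % 100 == expected: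
--                 return f"(arr[{i}] - {k}) % 100"
--             if (a * k) % 100 == expected:
--                 return f"(arr[{i}] * {k}) % 100"
--             if (i + a) % 100 == expected:
--                 return f"({i} + arr[{i}]) % 100"
--     return None
-- ===== Notes on version B (the rewrite author's own statement) =====
-- stated objective: faster
-- what changed: A's O(n^2) nested scan over all (i,j) pairs is replaced by two hash maps built in one pass (value -> first index, residue mod 100 -> first index), so for each i the minimal matching j for each condition is computed by O(1) lookups while preserving A's condition priority; the dead third condition (subsumed by the first) disappears.
import Mathlib
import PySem

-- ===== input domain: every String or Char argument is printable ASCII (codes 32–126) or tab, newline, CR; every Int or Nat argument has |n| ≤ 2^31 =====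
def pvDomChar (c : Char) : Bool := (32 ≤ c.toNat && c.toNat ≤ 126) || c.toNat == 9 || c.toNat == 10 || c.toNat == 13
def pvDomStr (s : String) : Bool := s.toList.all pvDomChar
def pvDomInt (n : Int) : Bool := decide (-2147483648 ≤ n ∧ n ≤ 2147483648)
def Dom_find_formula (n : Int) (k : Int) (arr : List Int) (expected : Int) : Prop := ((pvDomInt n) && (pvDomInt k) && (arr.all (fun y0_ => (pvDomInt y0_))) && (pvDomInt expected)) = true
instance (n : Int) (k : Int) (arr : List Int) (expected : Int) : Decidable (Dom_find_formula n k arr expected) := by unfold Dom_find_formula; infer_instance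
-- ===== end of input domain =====

-- B replaces A's O(n^2) nested pair scan by two hash maps (value -> first index and
-- residue mod 100 -> first index) built in one pass each, so the minimal matching j for
-- every i is found by O(1) lookups while A's condition priority is preserved exactly.
-- The f-string formatters below are shared by both ports (both Pythons build identical strings).
def pvFmtAdd (i j : Int) : String := "arr[" ++ PySem.Int.toStr i ++ "] + arr[" ++ PySem.Int.toStr j ++ "]"
def pvFmtSub (i j : Int) : String := "arr[" ++ PySem.Int.toStr i ++ "] - arr[" ++ PySem.Int.toStr j ++ "]"
def pvFmtAddMod (i j : Int) : String := "(arr[" ++ PySem.Int.toStr i ++ "] + arr[" ++ PySem.Int.toStr j ++ "]) % 100"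
def pvFmtMulK (i k : Int) : String := "arr[" ++ PySem.Int.toStr i ++ "] * " ++ PySem.Int.toStr k
def pvFmtAddK (i k : Int) : String := "(arr[" ++ PySem.Int.toStr i ++ "] + " ++ PySem.Int.toStr k ++ ") % 100"
def pvFmtSubK (i k : Int) : String := "(arr[" ++ PySem.Int.toStr i ++ "] - " ++ PySem.Int.toStr k ++ ") % 100"
def pvFmtMulKMod (i k : Int) : String := "(arr[" ++ PySem.Int.toStr i ++ "] * " ++ PySem.Int.toStr k ++ ") % 100"
def pvFmtIdx (i : Int) : String := "(" ++ PySem.Int.toStr i ++ " + arr[" ++ PySem.Int.toStr i ++ "]) % 100"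

-- ===== PORT A =====
-- inner 'for j in range(len(arr))' of A's double loop (early return modelled by Option)
def pvAInner (k expected : Int) (arr : List Int) (i : Int) : List Int → Option String
  | [] => none
  | j :: js =>
    let a := PySem.List.pyGetD arr i 0      -- arr[i]; i comes from range(len(arr)), in range: exact
    let b := PySem.List.pyGetD arr j 0      -- arr[j]
    if a + b = expected ∨ PySem.Int.mod (a + b) 100 = expected then some (pvFmtAdd i j)
    else if a - b = expected ∨ PySem.Int.mod (a - b) 100 = expected then some (pvFmtSub i j)
    else if PySem.Int.mod (a + b) 100 = expected then some (pvFmtAddMod i j)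
    else if a * k = expected ∨ PySem.Int.mod (a * k) 100 = expected then some (pvFmtMulK i k)
    else pvAInner k expected arr i js

-- outer 'for i in range(len(arr))' of A's double loop
def pvAOuter (k expected : Int) (arr : List Int) : List Int → Option String
  | [] => none
  | i :: is =>
    match pvAInner k expected arr i (PySem.List.pyRange 0 (PySem.List.len arr) 1) with
    | some s => some s
    | none => pvAOuter k expected arr is

-- A's second loop 'for i in range(len(arr))'
def pvASecond (k expected : Int) (arr : List Int) : List Int → Option String
  | [] => none
  | i :: is =>
    let a := PySem.List.pyGetD arr i 0
    if PySem.Int.mod (a + k) 100 = expected then some (pvFmtAddK i k)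
    else if PySem.Int.mod (a - k) 100 = expected then some (pvFmtSubK i k)
    else if PySem.Int.mod (a * k) 100 = expected then some (pvFmtMulKMod i k)
    else if PySem.Int.mod (i + a) 100 = expected then some (pvFmtIdx i)
    else pvASecond k expected arr is

def find_formula (n : Int) (k : Int) (arr : List Int) (expected : Int) : Option String :=
  match pvAOuter k expected arr (PySem.List.pyRange 0 (PySem.List.len arr) 1) with
  | some s => some s
  | none => pvASecond k expected arr (PySem.List.pyRange 0 (PySem.List.len arr) 1)

-- ===== PORT B =====
-- 'for idx, v in enumerate(arr): if v not in first_val: first_val[v] = idx'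
def pvBFirstVal (arr : List Int) : PySem.Dict Int Int :=
  (PySem.List.enumerate arr 0).foldl
    (fun d iv => if d.contains iv.2 then d else d.insert iv.2 iv.1) PySem.Dict.empty

-- 'for idx, v in enumerate(arr): r = v % 100; if r not in first_res: first_res[r] = idx'
def pvBFirstRes (arr : List Int) : PySem.Dict Int Int :=
  (PySem.List.enumerate arr 0).foldl
    (fun d iv => if d.contains (PySem.Int.mod iv.2 100) then d
                 else d.insert (PySem.Int.mod iv.2 100) iv.1) PySem.Dict.empty

-- B's main loop 'for i, a in enumerate(arr)'
def pvBMain (k expected big : Int) (inR : Bool) (fv fr : PySem.Dict Int Int) :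
    List (Int × Int) → Option String
  | [] => none
  | (i, a) :: rest =>
    let t1 := expected - a
    let j1 := fv.getD t1 big
    let j1 := if inR then min j1 (fr.getD (PySem.Int.mod t1 100) big) else j1
    let t2 := a - expected
    let j2 := fv.getD t2 big
    let j2 := if inR then min j2 (fr.getD (PySem.Int.mod t2 100) big) else j2
    let m := a * k
    let c4 := m = expected ∨ (inR = true ∧ PySem.Int.mod m 100 = expected)
    let j4 := if c4 then 0 else big
    let jm := min (min j1 j2) j4
    if jm < big then
      if j1 = jm then some (pvFmtAdd i jm)
      else if j2 = jm then some (pvFmtSub i jm)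
      else some (pvFmtMulK i k)
    else pvBMain k expected big inR fv fr rest

-- B's second loop (runs only when 0 <= expected < 100)
def pvBSecond (k expected : Int) : List (Int × Int) → Option String
  | [] => none
  | (i, a) :: rest =>
    if PySem.Int.mod (a + k) 100 = expected then some (pvFmtAddK i k)
    else if PySem.Int.mod (a - k) 100 = expected then some (pvFmtSubK i k)
    else if PySem.Int.mod (a * k) 100 = expected then some (pvFmtMulKMod i k)
    else if PySem.Int.mod (i + a) 100 = expected then some (pvFmtIdx i)
    else pvBSecond k expected rest

def find_formula_alt (n : Int) (k : Int) (arr : List Int) (expected : Int) : Option String :=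
  let fv := pvBFirstVal arr
  let fr := pvBFirstRes arr
  let big := PySem.List.len arr
  let inR := decide (0 ≤ expected ∧ expected < 100)
  match pvBMain k expected big inR fv fr (PySem.List.enumerate arr 0) with
  | some s => some s
  | none => if inR then pvBSecond k expected (PySem.List.enumerate arr 0) else none

-- ===== PRECONDITION & SPEC =====
def Spec_find_formula (n : Int) (k : Int) (arr : List Int) (expected : Int) (out : Option String) : Prop := out = find_formula_alt n k arr expected
instance (n : Int) (k : Int) (arr : List Int) (expected : Int) (out : Option String) : Decidable (Spec_find_formula n k arr expected out) := by unfold Spec_find_formula; infer_instance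

-- ===== CLAIM (what is proved, stated in full; the proofs are below) =====
def Claim_equal_find_formula : Prop := ∀ (n : Int) (k : Int) (arr : List Int) (expected : Int), Dom_find_formula n k arr expected → Spec_find_formula n k arr expected (find_formula n k arr expected)

-- ===== LEMMAS AND PROOFS =====


def pvNIdx (p : Int → Bool) (l : List Int) : Nat := (l.findIdx? p).getD l.length

theorem pvShiftGetD (o : Option Nat) (L : Nat) :
    (Option.map (fun i => i + 1) o).getD (L + 1) = o.getD L + 1 := by cases o <;> rfl

theorem pvNIdx_or (p q : Int → Bool) (l : List Int) :
    pvNIdx (fun v => p v || q v) l = min (pvNIdx p l) (pvNIdx q l) := by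
  induction l with
  | nil => simp [pvNIdx]
  | cons x t ih =>
    cases hp : p x <;> cases hq : q x <;>
      simp [pvNIdx, List.findIdx?_cons, hp, hq, pvShiftGetD] at ih ⊢ <;> omega

theorem pvNIdx_le (p : Int → Bool) (l : List Int) : pvNIdx p l ≤ l.length := by
  unfold pvNIdx
  cases h : l.findIdx? p with
  | none => simp
  | some d =>
    obtain ⟨hd, -⟩ := List.findIdx?_eq_some_iff_getElem.mp h
    simpa using hd.le

theorem pvNIdx_lt_iff (p : Int → Bool) (l : List Int) {d : Nat} (hd : d < l.length) :
    pvNIdx p l = d ↔ l.findIdx? p = some d := by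
  unfold pvNIdx
  cases h : l.findIdx? p with
  | none => simp; omega
  | some e => simp

theorem pvDict_aux (key : Int → Int) (arr : List Int) (t big : Int) :
    ∀ (s : Int) (d : PySem.Dict Int Int),
    ((PySem.List.enumerate arr s).foldl
      (fun d iv => if d.contains (key iv.2) then d else d.insert (key iv.2) iv.1) d).getD t big
    = if d.contains t then d.getD t big
      else match arr.findIdx? (fun v => key v == t) with
        | some e => s + (e : Int)
        | none => big := by
  induction arr with
  | nil =>
    intro s d
    simp only [PySem.List.enumerate_nil, List.foldl_nil, List.findIdx?_nil]
    by_cases h : d.contains t = true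
    · simp [h]
    · simp [h, PySem.Dict.getD_of_not_contains d big (by simpa using h)]
  | cons v vs ih =>
    intro s d
    rw [PySem.List.enumerate_cons, List.foldl_cons]
    cases hc : d.contains (key v) with
    | true =>
      simp only [hc, if_true]
      rw [ih]
      by_cases hkt : key v = t
      · have hct : d.contains t = true := hkt ▸ hc
        simp [hct]
      · simp only [List.findIdx?_cons, beq_iff_eq, hkt, decide_false, if_false]
        by_cases hct : d.contains t = true
        · simp [hct]
        · simp only [hct, if_false]
          cases h : vs.findIdx? (fun v => key v == t) <;> simp <;> push_cast <;> ring
    | false =>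
      simp only [hc, Bool.false_eq_true, if_false]
      rw [ih]
      by_cases hkt : key v = t
      · have hct : d.contains t = false := by
          simpa [hkt] using (by simpa using hc : d.contains (key v) = false)
        subst hkt
        simp [PySem.Dict.contains_insert_self, PySem.Dict.getD_insert_self, hct,
          List.findIdx?_cons]
      · have h1 : (d.insert (key v) s).contains t = d.contains t := by
          rw [PySem.Dict.contains_insert]
          simp [hkt, Ne.symm hkt]
        have h2 : (d.insert (key v) s).getD t big = d.getD t big :=
          PySem.Dict.getD_insert_of_ne d s big (Ne.symm hkt)
        rw [h1, h2]
        simp only [List.findIdx?_cons, beq_iff_eq, hkt, decide_false, if_false]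
        by_cases hct : d.contains t = true
        · simp [hct]
        · simp only [hct, if_false]
          cases h : vs.findIdx? (fun v => key v == t) <;> simp <;> push_cast <;> ring


def pvP1 (a e v : Int) : Bool := decide (a + v = e ∨ PySem.Int.mod (a + v) 100 = e)
def pvP2 (a e v : Int) : Bool := decide (a - v = e ∨ PySem.Int.mod (a - v) 100 = e)
def pvC4 (a k e : Int) : Bool := decide (a * k = e ∨ PySem.Int.mod (a * k) 100 = e)

theorem pvHeq2 (s d : Nat) : s + (d + 1) = s + 1 + d := by omega

theorem pvAInner_char (k e : Int) (arr : List Int) (i : Int) (a : Int)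
    (ha : a = PySem.List.pyGetD arr i 0) :
    ∀ (fuel s : Nat), arr.length ≤ s + fuel →
    pvAInner k e arr i (PySem.List.pyRange (s : Int) (PySem.List.len arr) 1) =
      (if s < arr.length then
         (if pvC4 a k e then
            (if pvP1 a e (arr.getD s 0) then some (pvFmtAdd i s)
             else if pvP2 a e (arr.getD s 0) then some (pvFmtSub i s)
             else some (pvFmtMulK i k))
          else
            match (arr.drop s).findIdx? (fun v => pvP1 a e v || pvP2 a e v) with
            | none => none
            | some d => if pvP1 a e (arr.getD (s + d) 0) then some (pvFmtAdd i (s + d))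
                        else some (pvFmtSub i (s + d)))
       else none) := by
  intro fuel
  induction fuel with
  | zero =>
    intro s hle
    rw [PySem.List.pyRange_one_eq_nil (by simp only [PySem.List.len_eq]; exact_mod_cast by omega)]
    simp only [pvAInner]
    rw [if_neg (by omega)]
  | succ fuel ih =>
    intro s hle
    by_cases hs : s < arr.length
    case neg =>
      rw [PySem.List.pyRange_one_eq_nil (by simp only [PySem.List.len_eq]; exact_mod_cast by omega)]
      simp only [pvAInner]
      rw [if_neg hs]
    case pos =>
      rw [if_pos hs]
      rw [PySem.List.pyRange_one_cons (by simp only [PySem.List.len_eq]; exact_mod_cast hs)]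
      simp only [pvAInner, PySem.List.pyGetD_natCast]
      rw [← ha]
      have hdrop : arr.drop s = arr.getD s 0 :: arr.drop (s + 1) := by
        rw [List.getD_eq_getElem arr 0 hs]
        exact (List.getElem_cons_drop hs).symm
      by_cases h1 : a + arr.getD s 0 = e ∨ PySem.Int.mod (a + arr.getD s 0) 100 = e
      · rw [if_pos h1]
        have hp1 : pvP1 a e (arr.getD s 0) = true := by simp only [pvP1, decide_eq_true_eq]; exact h1
        by_cases hc4 : pvC4 a k e = true
        · simp [← List.getD_eq_getElem?_getD, hc4, hp1]
        · simp only [Bool.not_eq_true] at hc4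
          rw [hc4]
          simp only [Bool.false_eq_true, if_false, hdrop, List.findIdx?_cons, hp1,
            Bool.true_or, if_true]
          simp [← List.getD_eq_getElem?_getD, hp1]
      · rw [if_neg h1]
        have hp1 : pvP1 a e (arr.getD s 0) = false := by simp only [pvP1, decide_eq_false_iff_not]; exact h1
        by_cases h2 : a - arr.getD s 0 = e ∨ PySem.Int.mod (a - arr.getD s 0) 100 = e
        · rw [if_pos h2]
          have hp2 : pvP2 a e (arr.getD s 0) = true := by simp only [pvP2, decide_eq_true_eq]; exact h2
          by_cases hc4 : pvC4 a k e = true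
          · simp [← List.getD_eq_getElem?_getD, hc4, hp1, hp2]
          · simp only [Bool.not_eq_true] at hc4
            rw [hc4]
            simp only [Bool.false_eq_true, if_false, hdrop, List.findIdx?_cons, hp1, hp2,
              Bool.false_or, if_true]
            simp [← List.getD_eq_getElem?_getD, hp1, hp2]
        · rw [if_neg h2]
          have hp2 : pvP2 a e (arr.getD s 0) = false := by simp only [pvP2, decide_eq_false_iff_not]; exact h2
          have h3 : ¬ PySem.Int.mod (a + arr.getD s 0) 100 = e := by tauto
          rw [if_neg h3]
          by_cases h4 : a * k = e ∨ PySem.Int.mod (a * k) 100 = e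
          · rw [if_pos h4]
            have hc4 : pvC4 a k e = true := by simp only [pvC4, decide_eq_true_eq]; exact h4
            simp [← List.getD_eq_getElem?_getD, hc4, hp1, hp2]
          · rw [if_neg h4]
            have hc4 : pvC4 a k e = false := by simp only [pvC4, decide_eq_false_iff_not]; exact h4
            rw [hc4]
            simp only [Bool.false_eq_true, if_false]
            have hcast : ((s : Int) + 1) = ((s + 1 : Nat) : Int) := by push_cast; ring
            rw [hcast, ih (s + 1) (by omega)]
            simp only [hc4, Bool.false_eq_true, if_false]
            by_cases hs1 : s + 1 < arr.length
            · rw [if_pos hs1]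
              rw [hdrop]
              simp only [List.findIdx?_cons, hp1, hp2, Bool.or_self, Bool.false_eq_true,
                if_false]
              cases h : (arr.drop (s + 1)).findIdx? (fun v => pvP1 a e v || pvP2 a e v) with
              | none => simp
              | some d =>
                simp only [Option.map_some, pvHeq2 s d]
                push_cast
                ring_nf
            · rw [if_neg hs1]
              have hnil : arr.drop (s + 1) = [] := List.drop_eq_nil_of_le (by omega)
              rw [hdrop, hnil]
              simp [← List.getD_eq_getElem?_getD, List.findIdx?_cons, hp1, hp2]


theorem pvModP1 (a e v : Int) (h : 0 ≤ e ∧ e < 100) :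
    PySem.Int.mod (a + v) 100 = e ↔ PySem.Int.mod v 100 = PySem.Int.mod (e - a) 100 := by
  rw [PySem.Int.mod_eq_emod_of_pos (by norm_num), PySem.Int.mod_eq_emod_of_pos (by norm_num),
    PySem.Int.mod_eq_emod_of_pos (by norm_num)]
  omega

theorem pvModP2 (a e v : Int) (h : 0 ≤ e ∧ e < 100) :
    PySem.Int.mod (a - v) 100 = e ↔ PySem.Int.mod v 100 = PySem.Int.mod (a - e) 100 := by
  rw [PySem.Int.mod_eq_emod_of_pos (by norm_num), PySem.Int.mod_eq_emod_of_pos (by norm_num),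
    PySem.Int.mod_eq_emod_of_pos (by norm_num)]
  omega

theorem pvModRange (x e : Int) (h : ¬ (0 ≤ e ∧ e < 100)) : ¬ PySem.Int.mod x 100 = e := by
  intro hx
  exact h ⟨hx ▸ PySem.Int.mod_nonneg x (by norm_num), hx ▸ PySem.Int.mod_lt x (by norm_num)⟩

theorem pvFV (arr : List Int) (t : Int) :
    (pvBFirstVal arr).getD t ((arr.length : Int)) = ((pvNIdx (fun v => v == t) arr : Nat) : Int) := by
  have h := pvDict_aux (fun v => v) arr t ((arr.length : Int)) 0 PySem.Dict.empty
  simp only [PySem.Dict.contains_empty, Bool.false_eq_true, if_false] at h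
  unfold pvBFirstVal pvNIdx
  rw [h]
  cases hf : arr.findIdx? (fun v => v == t) <;> simp [hf]

theorem pvFR (arr : List Int) (t : Int) :
    (pvBFirstRes arr).getD t ((arr.length : Int))
      = ((pvNIdx (fun v => PySem.Int.mod v 100 == t) arr : Nat) : Int) := by
  have h := pvDict_aux (fun v => PySem.Int.mod v 100) arr t ((arr.length : Int)) 0 PySem.Dict.empty
  simp only [PySem.Dict.contains_empty, Bool.false_eq_true, if_false] at h
  unfold pvBFirstRes pvNIdx
  rw [h]
  cases hf : arr.findIdx? (fun v => PySem.Int.mod v 100 == t) <;> simp [hf]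

theorem pvP1_inR (a e : Int) (hR : 0 ≤ e ∧ e < 100) (v : Int) :
    pvP1 a e v = ((v == e - a) || (PySem.Int.mod v 100 == PySem.Int.mod (e - a) 100)) := by
  have h1 : (a + v = e ∨ PySem.Int.mod (a + v) 100 = e)
      ↔ (v = e - a ∨ PySem.Int.mod v 100 = PySem.Int.mod (e - a) 100) :=
    or_congr (by omega) (pvModP1 a e v hR)
  rw [pvP1, decide_eq_decide.mpr h1, Bool.decide_or, Bool.beq_eq_decide_eq, Bool.beq_eq_decide_eq]

theorem pvP1_noR (a e : Int) (hR : ¬ (0 ≤ e ∧ e < 100)) (v : Int) :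
    pvP1 a e v = (v == e - a) := by
  have h1 : (a + v = e ∨ PySem.Int.mod (a + v) 100 = e) ↔ v = e - a := by
    constructor
    · rintro (h | h)
      · omega
      · exact absurd h (pvModRange _ e hR)
    · intro h; left; omega
  rw [pvP1, decide_eq_decide.mpr h1, Bool.beq_eq_decide_eq]

theorem pvP2_inR (a e : Int) (hR : 0 ≤ e ∧ e < 100) (v : Int) :
    pvP2 a e v = ((v == a - e) || (PySem.Int.mod v 100 == PySem.Int.mod (a - e) 100)) := by
  have h1 : (a - v = e ∨ PySem.Int.mod (a - v) 100 = e)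
      ↔ (v = a - e ∨ PySem.Int.mod v 100 = PySem.Int.mod (a - e) 100) :=
    or_congr (by omega) (pvModP2 a e v hR)
  rw [pvP2, decide_eq_decide.mpr h1, Bool.decide_or, Bool.beq_eq_decide_eq, Bool.beq_eq_decide_eq]

theorem pvP2_noR (a e : Int) (hR : ¬ (0 ≤ e ∧ e < 100)) (v : Int) :
    pvP2 a e v = (v == a - e) := by
  have h1 : (a - v = e ∨ PySem.Int.mod (a - v) 100 = e) ↔ v = a - e := by
    constructor
    · rintro (h | h)
      · omega
      · exact absurd h (pvModRange _ e hR)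
    · intro h; left; omega
  rw [pvP2, decide_eq_decide.mpr h1, Bool.beq_eq_decide_eq]

theorem pvJ1 (arr : List Int) (a e : Int) :
    (if decide (0 ≤ e ∧ e < 100)
     then min ((pvBFirstVal arr).getD (e - a) ((arr.length : Int)))
              ((pvBFirstRes arr).getD (PySem.Int.mod (e - a) 100) ((arr.length : Int)))
     else (pvBFirstVal arr).getD (e - a) ((arr.length : Int)))
    = ((pvNIdx (pvP1 a e) arr : Nat) : Int) := by
  by_cases hR : 0 ≤ e ∧ e < 100
  · rw [if_pos (by simpa using hR), pvFV, pvFR, ← Nat.cast_min, ← pvNIdx_or]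
    congr 1
    apply congrArg (fun p => pvNIdx p arr)
    funext v
    exact (pvP1_inR a e hR v).symm
  · rw [if_neg (by simpa using hR), pvFV]
    congr 1
    apply congrArg (fun p => pvNIdx p arr)
    funext v
    exact (pvP1_noR a e hR v).symm

theorem pvJ2 (arr : List Int) (a e : Int) :
    (if decide (0 ≤ e ∧ e < 100)
     then min ((pvBFirstVal arr).getD (a - e) ((arr.length : Int)))
              ((pvBFirstRes arr).getD (PySem.Int.mod (a - e) 100) ((arr.length : Int)))
     else (pvBFirstVal arr).getD (a - e) ((arr.length : Int)))
    = ((pvNIdx (pvP2 a e) arr : Nat) : Int) := by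
  by_cases hR : 0 ≤ e ∧ e < 100
  · rw [if_pos (by simpa using hR), pvFV, pvFR, ← Nat.cast_min, ← pvNIdx_or]
    congr 1
    apply congrArg (fun p => pvNIdx p arr)
    funext v
    exact (pvP2_inR a e hR v).symm
  · rw [if_neg (by simpa using hR), pvFV]
    congr 1
    apply congrArg (fun p => pvNIdx p arr)
    funext v
    exact (pvP2_noR a e hR v).symm

theorem pvNIdx_zero_iff (p : Int → Bool) (l : List Int) (h0 : 0 < l.length) :
    pvNIdx p l = 0 ↔ p (l.getD 0 0) = true := by
  rw [pvNIdx_lt_iff p l h0, List.findIdx?_eq_some_iff_getElem]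
  constructor
  · rintro ⟨h, hp, -⟩
    rwa [List.getD_eq_getElem l 0 h0]
  · intro hp
    exact ⟨h0, by rwa [← List.getD_eq_getElem l 0 h0], fun j hj => absurd hj (by omega)⟩

theorem pvNIdx_eq_imp (p : Int → Bool) (l : List Int) {d : Nat} (hd : d < l.length)
    (h : pvNIdx p l = d) : p (l.getD d 0) = true := by
  obtain ⟨h1, h2, -⟩ := List.findIdx?_eq_some_iff_getElem.mp ((pvNIdx_lt_iff p l hd).mp h)
  rwa [List.getD_eq_getElem l 0 hd]

theorem pvBody (k e : Int) (arr : List Int) (h0 : 0 < arr.length) (i : Int) :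
    pvAInner k e arr i (PySem.List.pyRange 0 (PySem.List.len arr) 1) =
      pvBMain k e (PySem.List.len arr) (decide (0 ≤ e ∧ e < 100)) (pvBFirstVal arr)
        (pvBFirstRes arr) [(i, PySem.List.pyGetD arr i 0)] := by
  set a := PySem.List.pyGetD arr i 0 with ha
  have hchar := pvAInner_char k e arr i a ha arr.length 0 (by omega)
  rw [show ((0 : Nat) : Int) = (0 : Int) by norm_num] at hchar
  rw [hchar, if_pos h0]
  simp only [pvBMain, PySem.List.len_eq, pvJ1 arr a e, pvJ2 arr a e]
  set n1 := pvNIdx (pvP1 a e) arr with hn1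
  set n2 := pvNIdx (pvP2 a e) arr with hn2
  have hb : (0 : Int) < (arr.length : Int) := by exact_mod_cast h0
  have hg0 : arr.getD 0 0 = arr[0]'h0 := List.getD_eq_getElem arr 0 h0
  by_cases hc4p : a * k = e ∨ PySem.Int.mod (a * k) 100 = e
  · have hc4 : pvC4 a k e = true := by simp only [pvC4, decide_eq_true_eq]; exact hc4p
    have hc4B : a * k = e ∨ (decide (0 ≤ e ∧ e < 100) = true ∧ PySem.Int.mod (a * k) 100 = e) := by
      rcases hc4p with h | h
      · exact Or.inl h
      · refine Or.inr ⟨decide_eq_true ?_, h⟩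
        exact ⟨h ▸ PySem.Int.mod_nonneg _ (by norm_num), h ▸ PySem.Int.mod_lt _ (by norm_num)⟩
    have hjm : min (min ((n1 : Int)) ((n2 : Int))) (0 : Int) = 0 := min_eq_right (by positivity)
    conv_rhs => rw [if_pos hc4B, hjm]
    rw [if_pos hc4, if_pos hb]
    by_cases hp1 : pvP1 a e (arr.getD 0 0) = true
    · have h10 : ((n1 : Int)) = 0 := by
        exact_mod_cast congrArg (Nat.cast : Nat → Int) ((pvNIdx_zero_iff _ _ h0).mpr hp1)
      rw [if_pos hp1, if_pos h10]
    · have h10 : ¬ ((n1 : Int)) = 0 := by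
        intro h
        exact hp1 ((pvNIdx_zero_iff _ _ h0).mp (by exact_mod_cast h))
      rw [if_neg hp1, if_neg h10]
      by_cases hp2 : pvP2 a e (arr.getD 0 0) = true
      · have h20 : ((n2 : Int)) = 0 := by
          exact_mod_cast congrArg (Nat.cast : Nat → Int) ((pvNIdx_zero_iff _ _ h0).mpr hp2)
        rw [if_pos hp2, if_pos h20]
      · have h20 : ¬ ((n2 : Int)) = 0 := by
          intro h
          exact hp2 ((pvNIdx_zero_iff _ _ h0).mp (by exact_mod_cast h))
        rw [if_neg hp2, if_neg h20]
  · have hc4 : pvC4 a k e = false := by simp only [pvC4, decide_eq_false_iff_not]; exact hc4p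
    have hc4B : ¬ (a * k = e ∨ (decide (0 ≤ e ∧ e < 100) = true ∧ PySem.Int.mod (a * k) 100 = e)) := by
      rintro (h | ⟨-, h⟩)
      · exact hc4p (Or.inl h)
      · exact hc4p (Or.inr h)
    have hor := pvNIdx_or (pvP1 a e) (pvP2 a e) arr
    have hle1 : n1 ≤ arr.length := pvNIdx_le _ _
    have hle2 : n2 ≤ arr.length := pvNIdx_le _ _
    rw [if_neg (by rw [hc4]; exact Bool.false_ne_true)]
    conv_rhs => rw [if_neg hc4B]
    have hjm : min (min ((n1 : Int)) ((n2 : Int))) ((arr.length : Int))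
        = ((pvNIdx (fun v => pvP1 a e v || pvP2 a e v) arr : Nat) : Int) := by
      rw [hor]
      push_cast
      omega
    conv_rhs => rw [hjm]
    rw [List.drop_zero]
    cases hfind : arr.findIdx? (fun v => pvP1 a e v || pvP2 a e v) with
    | none =>
      have hN : pvNIdx (fun v => pvP1 a e v || pvP2 a e v) arr = arr.length := by
        unfold pvNIdx; rw [hfind]; rfl
      dsimp only
      rw [hN, if_neg (by omega)]
    | some d =>
      obtain ⟨hdL, hord, hmin⟩ := List.findIdx?_eq_some_iff_getElem.mp hfind
      have hN : pvNIdx (fun v => pvP1 a e v || pvP2 a e v) arr = d := by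
        unfold pvNIdx; rw [hfind]; rfl
      have hdL' : ((d : Nat) : Int) < (arr.length : Int) := by exact_mod_cast hdL
      have hgetd : arr.getD d 0 = arr[d] := List.getD_eq_getElem arr 0 hdL
      dsimp only
      rw [hN, if_pos hdL']
      by_cases hp1 : pvP1 a e (arr.getD d 0) = true
      · have hf1 : arr.findIdx? (pvP1 a e) = some d := by
          refine List.findIdx?_eq_some_iff_getElem.mpr ⟨hdL, by rwa [← hgetd], fun j hj => ?_⟩
          have hm := hmin j hj
          simp only [Bool.or_eq_true, not_or] at hm
          simp [hm.1]
        have h1d : ((n1 : Int)) = ((d : Nat) : Int) := by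
          have hnat : n1 = d := by rw [hn1]; unfold pvNIdx; rw [hf1]; rfl
          exact_mod_cast congrArg (Nat.cast : Nat → Int) hnat
        rw [if_pos (by rw [show (0 : Nat) + d = d by omega]; exact hp1), if_pos h1d]
        norm_num
      · have hp2 : pvP2 a e (arr.getD d 0) = true := by
          rw [hgetd] at hp1 ⊢
          rcases Bool.or_eq_true_iff.mp hord with h | h
          · exact absurd h hp1
          · exact h
        have h1d : ¬ ((n1 : Int)) = ((d : Nat) : Int) := by
          intro h
          have hnat : n1 = d := by exact_mod_cast h
          exact hp1 (pvNIdx_eq_imp _ _ hdL hnat)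
        have hf2 : arr.findIdx? (pvP2 a e) = some d := by
          refine List.findIdx?_eq_some_iff_getElem.mpr ⟨hdL, by rwa [← hgetd], fun j hj => ?_⟩
          have hm := hmin j hj
          simp only [Bool.or_eq_true, not_or] at hm
          simp [hm.2]
        have h2d : ((n2 : Int)) = ((d : Nat) : Int) := by
          have hnat : n2 = d := by rw [hn2]; unfold pvNIdx; rw [hf2]; rfl
          exact_mod_cast congrArg (Nat.cast : Nat → Int) hnat
        rw [if_neg (by rw [show (0 : Nat) + d = d by omega]; exact hp1), if_neg h1d,
          if_pos h2d]
        norm_num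

theorem pvBMain_cons (k e big : Int) (inR : Bool) (fv fr : PySem.Dict Int Int) (i a : Int)
    (rest : List (Int × Int)) :
    pvBMain k e big inR fv fr ((i, a) :: rest)
      = match pvBMain k e big inR fv fr [(i, a)] with
        | some s => some s
        | none => pvBMain k e big inR fv fr rest := by
  simp only [pvBMain]
  split_ifs <;> rfl

theorem pvMain_eq (k e : Int) (arr : List Int) (h0 : 0 < arr.length) :
    ∀ is : List Int,
    pvAOuter k e arr is
      = pvBMain k e (PySem.List.len arr) (decide (0 ≤ e ∧ e < 100)) (pvBFirstVal arr)
          (pvBFirstRes arr) (is.map (fun j => (j, PySem.List.pyGetD arr j 0))) := by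
  intro is
  induction is with
  | nil => rfl
  | cons i is ih =>
    simp only [List.map_cons]
    rw [pvBMain_cons, ← pvBody k e arr h0 i]
    simp only [pvAOuter]
    cases pvAInner k e arr i (PySem.List.pyRange 0 (PySem.List.len arr) 1) with
    | some s => rfl
    | none => exact ih

theorem pvSecond_eq (k e : Int) (arr : List Int) :
    ∀ is : List Int,
    pvASecond k e arr is = pvBSecond k e (is.map (fun j => (j, PySem.List.pyGetD arr j 0))) := by
  intro is
  induction is with
  | nil => rfl
  | cons i is ih =>
    simp only [pvASecond, pvBSecond, List.map_cons]
    rw [ih]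

theorem pvSecond_none (k e : Int) (arr : List Int) (hnR : ¬ (0 ≤ e ∧ e < 100)) :
    ∀ is : List Int, pvASecond k e arr is = none := by
  intro is
  induction is with
  | nil => rfl
  | cons i is ih =>
    simp only [pvASecond]
    rw [if_neg (pvModRange _ e hnR), if_neg (pvModRange _ e hnR),
      if_neg (pvModRange _ e hnR), if_neg (pvModRange _ e hnR), ih]

theorem find_formula_eq (n k : Int) (arr : List Int) (e : Int) :
    find_formula n k arr e = find_formula_alt n k arr e := by
  simp only [find_formula, find_formula_alt]
  rcases Nat.eq_zero_or_pos arr.length with h0 | h0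
  · have harr : arr = [] := List.eq_nil_of_length_eq_zero h0
    subst harr
    simp [pvAOuter, pvASecond, pvBMain, pvBSecond, PySem.List.enumerate_nil, ite_self]
  · rw [PySem.List.enumerate_eq_map_pyRange arr 0,
      ← pvMain_eq k e arr h0 (PySem.List.pyRange 0 (PySem.List.len arr) 1)]
    cases pvAOuter k e arr (PySem.List.pyRange 0 (PySem.List.len arr) 1) with
    | some s => rfl
    | none =>
      dsimp only
      by_cases hR : 0 ≤ e ∧ e < 100
      · rw [if_pos (by simpa using hR)]
        exact pvSecond_eq k e arr _
      · rw [if_neg (by simpa using hR)]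
        exact pvSecond_none k e arr hR _

-- ===== VERDICT (by name: the statement is the Claim_ definition above) =====
theorem find_formula_spec : Claim_equal_find_formula := by
  intro n k arr expected _
  show _ = _
  exact find_formula_eq n k arr expected
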